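-- pv_equiv track=rewrite | github.com/zawuoff/python_practice | assignment_2.py | calculate_critical_hits
-- ===== SOURCE A (Python) =====
-- def calculate_critical_hits(total_attacks):
--     """
--     In this game, every 3rd attack is a CRITICAL HIT (double damage).
--     Every 5th attack is a MISS (zero damage).
--     Normal attacks do 10 damage.
--
--     Calculate the total damage after 'total_attacks'.
--
--     Rules:
--     - Loop from 1 to total_attacks (inclusive).
--     - If the attack number is divisible by 3, add 20 damage.
--     - If the attack number is divisible by 5, add 0 damage.
--     - Otherwise, add 10 damage.
--     - Important: If a number is divisible by both 3 and 5 (like 15),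
--       treat it as a MISS (priority to the miss).
--
--     Return the total damage.
--     """
--     # Write your code here
--     total_damage = 0
--     normal_dmg = 10
--     critical_dmg = normal_dmg * 2
--     miss = 0
--
--     for i in range(1, total_attacks + 1):
--         if i % 3 == 0:
--             total_damage += critical_dmg
--         elif i % 5 == 0:
--             total_damage += miss
--         elif (i % 3 == 0) and (i % 5 == 0):
--             total_damage += miss
--         else:
--             total_damage += normal_dmg
--     return total_damage
-- ===== SOURCE B (Python) =====
-- def calculate_critical_hits(total_attacks):
--     n = total_attacks
--     if n <= 0:
--         return 0
--     crits = n // 3                      # every 3rd attack: 20 damage (A's branch order gives 15,30,... the crit too)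
--     misses = n // 5 - n // 15           # multiples of 5 that are not multiples of 3: 0 damage
--     return 20 * crits + 10 * (n - crits - misses)
-- ===== Notes on version B (the rewrite author's own statement) =====
-- stated objective: faster
-- what changed: Replaced the O(n) attack-by-attack loop with a closed-form O(1) formula counting multiples of 3, and of 5-but-not-3, via floor division.
import Mathlib
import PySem

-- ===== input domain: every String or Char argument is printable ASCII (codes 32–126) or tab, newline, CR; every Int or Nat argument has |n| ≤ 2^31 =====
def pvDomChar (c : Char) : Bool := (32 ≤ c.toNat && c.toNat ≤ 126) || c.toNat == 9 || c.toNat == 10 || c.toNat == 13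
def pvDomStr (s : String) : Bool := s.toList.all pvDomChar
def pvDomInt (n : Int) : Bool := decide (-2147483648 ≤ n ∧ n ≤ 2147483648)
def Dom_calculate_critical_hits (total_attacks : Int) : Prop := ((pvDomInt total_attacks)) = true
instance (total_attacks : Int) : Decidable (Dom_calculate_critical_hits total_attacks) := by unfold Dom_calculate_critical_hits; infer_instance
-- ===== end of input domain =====

-- B replaces A's O(n) per-attack loop with a closed-form O(1) floor-division formula (same values everywhere).


-- ===== PORT A =====
def calculate_critical_hits (total_attacks : Int) : Int :=
  (PySem.List.pyRange 1 (total_attacks + 1) 1).foldl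
    (fun total_damage i =>
      if PySem.Int.mod i 3 = 0 then total_damage + (10 * 2)
      else if PySem.Int.mod i 5 = 0 then total_damage + 0
      else if PySem.Int.mod i 3 = 0 ∧ PySem.Int.mod i 5 = 0 then total_damage + 0
      else total_damage + 10) 0

-- ===== PORT B =====
def calculate_critical_hits_alt (total_attacks : Int) : Int :=
  if total_attacks ≤ 0 then 0
  else
    let crits := PySem.Int.floordiv total_attacks 3
    let misses := PySem.Int.floordiv total_attacks 5 - PySem.Int.floordiv total_attacks 15
    20 * crits + 10 * (total_attacks - crits - misses)

-- ===== PRECONDITION & SPEC =====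
def Spec_calculate_critical_hits (total_attacks : Int) (out : Int) : Prop := out = calculate_critical_hits_alt total_attacks
instance (total_attacks : Int) (out : Int) : Decidable (Spec_calculate_critical_hits total_attacks out) := by unfold Spec_calculate_critical_hits; infer_instance

-- ===== CLAIM (what is proved, stated in full; the proofs are below) =====
def Claim_equal_calculate_critical_hits : Prop := ∀ (total_attacks : Int), Dom_calculate_critical_hits total_attacks → Spec_calculate_critical_hits total_attacks (calculate_critical_hits total_attacks)

-- ===== LEMMAS AND PROOFS =====

-- the single-attack damage added by A's loop body
def pvStep (i : Int) : Int :=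
  if PySem.Int.mod i 3 = 0 then 20
  else if PySem.Int.mod i 5 = 0 then 0
  else if PySem.Int.mod i 3 = 0 ∧ PySem.Int.mod i 5 = 0 then 0
  else 10

-- closed form, as a function of a nonnegative bound
def pvClosed (n : Int) : Int :=
  20 * (n / 3) + 10 * (n - n / 3 - (n / 5 - n / 15))

lemma pvStep_closed (m : Nat) :
    pvStep ((m : Int) + 1) = pvClosed ((m : Int) + 1) - pvClosed (m : Int) := by
  unfold pvStep pvClosed
  rw [PySem.Int.mod_eq_emod_of_pos (by norm_num : (0:Int) < 3),
      PySem.Int.mod_eq_emod_of_pos (by norm_num : (0:Int) < 5)]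
  obtain ⟨q, r, hm, h0, h15⟩ : ∃ q r : Int, (m : Int) = 15 * q + r ∧ 0 ≤ r ∧ r < 15 :=
    ⟨(m : Int) / 15, (m : Int) % 15, by omega, by omega, by omega⟩
  rw [hm]
  interval_cases r <;> split_ifs <;> omega

lemma pvLoop_step (acc i : Int) :
    (if PySem.Int.mod i 3 = 0 then acc + 20
     else if PySem.Int.mod i 5 = 0 then acc + 0
     else if PySem.Int.mod i 3 = 0 ∧ PySem.Int.mod i 5 = 0 then acc + 0
     else acc + 10) = acc + pvStep i := by
  unfold pvStep
  split_ifs <;> ring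

lemma pvLoop_closed (m : Nat) :
    calculate_critical_hits (m : Int) = pvClosed (m : Int) := by
  induction m with
  | zero =>
    unfold calculate_critical_hits pvClosed
    rw [PySem.List.pyRange_one_eq_nil (by norm_num)]
    rfl
  | succ k ih =>
    unfold calculate_critical_hits at *
    simp only [show (10:Int) * 2 = 20 from rfl] at ih ⊢
    push_cast
    rw [show ((k : Int) + 1 + 1) = ((k : Int) + 1) + 1 by ring,
        PySem.List.pyRange_one_succ_right (by omega : (1:Int) ≤ (k : Int) + 1),
        List.foldl_append]
    simp only [List.foldl_cons, List.foldl_nil]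
    rw [pvLoop_step, ih, pvStep_closed k]
    ring

-- ===== VERDICT (by name: the statement is the Claim_ definition above) =====
theorem calculate_critical_hits_spec : Claim_equal_calculate_critical_hits := by
  intro n _
  unfold Spec_calculate_critical_hits calculate_critical_hits_alt
  by_cases hn : n ≤ 0
  · simp only [if_pos hn]
    unfold calculate_critical_hits
    rw [PySem.List.pyRange_one_eq_nil (by omega)]
    rfl
  · simp only [if_neg hn]
    have hm : ((n.toNat : Int)) = n := Int.toNat_of_nonneg (by omega)
    have := pvLoop_closed n.toNat
    rw [hm] at this
    rw [this]
    unfold pvClosed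
    rw [PySem.Int.floordiv_eq_ediv_of_pos (by norm_num : (0:Int) < 3),
        PySem.Int.floordiv_eq_ediv_of_pos (by norm_num : (0:Int) < 5),
        PySem.Int.floordiv_eq_ediv_of_pos (by norm_num : (0:Int) < 15)]
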